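-- pv_equiv track=rewrite | github.com/hiway25/IT5016D | strings/ReplacingPartString.py | capitalize_every_fifth
-- ===== SOURCE A (Python) =====
-- def capitalize_every_fifth(input_string):
--     result = ""
--     for i, char in enumerate(input_string):
--         if(i + 1) % 5 == 0:
--             result += char.upper()
--         else:
--             result += char
--     return result
-- ===== SOURCE B (Python) =====
-- def capitalize_every_fifth(input_string):
--     pieces = []
--     for start in range(0, len(input_string), 5):
--         chunk = input_string[start:start + 5]
--         if len(chunk) == 5:
--             pieces.append(chunk[:4] + chunk[4].upper())
--         else:
--             pieces.append(chunk)
--     return "".join(pieces)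
-- ===== Notes on version B (the rewrite author's own statement) =====
-- stated objective: alternative
-- what changed: Replaces the per-character enumerate loop with a per-character modulo test by a chunked pass: iterate over range(0, len, 5), rewrite each full 5-chunk as chunk[:4] + chunk[4].upper(), keep a trailing partial chunk unchanged, and join the pieces.
import Mathlib
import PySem

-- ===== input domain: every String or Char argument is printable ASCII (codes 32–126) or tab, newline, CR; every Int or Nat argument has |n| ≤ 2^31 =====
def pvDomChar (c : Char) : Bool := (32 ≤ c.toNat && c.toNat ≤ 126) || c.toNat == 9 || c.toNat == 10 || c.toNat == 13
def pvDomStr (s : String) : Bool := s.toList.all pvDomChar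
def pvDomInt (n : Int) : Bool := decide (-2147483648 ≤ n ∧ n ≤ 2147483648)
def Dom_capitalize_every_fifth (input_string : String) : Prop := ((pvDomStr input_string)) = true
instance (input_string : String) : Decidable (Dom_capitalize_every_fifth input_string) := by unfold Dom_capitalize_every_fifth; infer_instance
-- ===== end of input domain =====

-- B rewrites the string chunkwise (groups of five via range(0, len, 5)) instead of A's
-- per-character enumerate loop with an (i+1) % 5 test; objective: alternative decomposition.

-- ===== PORT A =====
-- A builds `result` by appending one character per step of `enumerate(input_string)`;
-- `char.upper()` on a single character is PySem.Chars.upperChar (exact on the ASCII domain);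
-- `(i+1) % 5` has a positive divisor and nonnegative i, where Lean's Int `%` agrees with Python's.
def capitalize_every_fifth (input_string : String) : String :=
  String.ofList
    ((PySem.List.enumerate input_string.toList 0).foldl
      (fun result ic =>
        if (ic.1 + 1) % 5 == 0 then result ++ [PySem.Chars.upperChar ic.2]
        else result ++ [ic.2])
      [])

-- ===== PORT B =====
-- pieces : List (List Char) mirrors Source B's list of string pieces; `"".join(pieces)` is
-- concatenation of the pieces, i.e. `.flatten` (exact); `chunk[4]` is guarded by the
-- length-5 test, so `pyGetD chunk 4 ' '` is exact there.
def capitalize_every_fifth_alt (input_string : String) : String :=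
  let cs := input_string.toList
  let pieces := (PySem.List.pyRange 0 (cs.length : Int) 5).foldl
    (fun pieces start =>
      let chunk := PySem.List.slice cs (some start) (some (start + 5))
      if chunk.length == 5 then
        pieces ++ [PySem.List.slice chunk none (some (4 : Int)) ++
                   [PySem.Chars.upperChar (PySem.List.pyGetD chunk 4 ' ')]]
      else
        pieces ++ [chunk])
    ([] : List (List Char))
  String.ofList pieces.flatten

-- ===== PRECONDITION & SPEC =====
def Spec_capitalize_every_fifth (input_string : String) (out : String) : Prop := out = capitalize_every_fifth_alt input_string
instance (input_string : String) (out : String) : Decidable (Spec_capitalize_every_fifth input_string out) := by unfold Spec_capitalize_every_fifth; infer_instance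

-- ===== CLAIM (what is proved, stated in full; the proofs are below) =====
def Claim_equal_capitalize_every_fifth : Prop := ∀ (input_string : String), Dom_capitalize_every_fifth input_string → Spec_capitalize_every_fifth input_string (capitalize_every_fifth input_string)

-- ===== LEMMAS AND PROOFS =====

-- the common chunkwise description: uppercase every fifth character
def pvGo : List Char → List Char
  | a :: b :: c :: d :: e :: rest => a :: b :: c :: d :: PySem.Chars.upperChar e :: pvGo rest
  | l => l

-- A's per-character step
def pvF (ic : Int × Char) : Char :=
  if (ic.1 + 1) % 5 == 0 then PySem.Chars.upperChar ic.2 else ic.2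

-- B's per-chunk piece
def pvH (cs : List Char) (start : Int) : List Char :=
  let chunk := PySem.List.slice cs (some start) (some (start + 5))
  if chunk.length == 5 then
    PySem.List.slice chunk none (some (4 : Int)) ++
      [PySem.Chars.upperChar (PySem.List.pyGetD chunk 4 ' ')]
  else chunk

theorem pvA_foldl (cs : List Char) (s : Int) (acc : List Char) :
    (PySem.List.enumerate cs s).foldl
      (fun result ic =>
        if (ic.1 + 1) % 5 == 0 then result ++ [PySem.Chars.upperChar ic.2]
        else result ++ [ic.2]) acc
    = acc ++ (PySem.List.enumerate cs s).map pvF := by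
  induction cs generalizing s acc with
  | nil => simp [PySem.List.enumerate_nil]
  | cons x xs ih =>
    simp only [PySem.List.enumerate_cons, List.foldl_cons, List.map_cons]
    rw [ih]
    by_cases h : (s + 1) % 5 == 0 <;> simp [pvF, h]

theorem pvA_eq_go (cs : List Char) (s : Int) (hs : s % 5 = 0) :
    (PySem.List.enumerate cs s).map pvF = pvGo cs := by
  induction cs using pvGo.induct generalizing s with
  | case1 a b c d e rest ih =>
    simp only [PySem.List.enumerate_cons, List.map_cons, pvGo]
    rw [ih (s + 1 + 1 + 1 + 1 + 1) (by omega)]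
    simp only [pvF]
    rw [show ((s + 1) % 5 == 0) = false by simp; omega,
        show ((s + 1 + 1) % 5 == 0) = false by simp; omega,
        show ((s + 1 + 1 + 1) % 5 == 0) = false by simp; omega,
        show ((s + 1 + 1 + 1 + 1) % 5 == 0) = false by simp; omega,
        show ((s + 1 + 1 + 1 + 1 + 1) % 5 == 0) = true by simp; omega]
    simp
  | case2 l hl =>
    -- l has fewer than 5 elements: no index hits the condition
    match l, hl with
    | a :: b :: c :: d :: e :: rest, hl => exact absurd rfl (hl a b c d e rest)
    | [], _ => simp [PySem.List.enumerate_nil, pvGo]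
    | [a], _ =>
      simp [PySem.List.enumerate_cons, PySem.List.enumerate_nil, pvF, pvGo,
        show ((s + 1) % 5 == 0) = false by simp; omega]
    | [a, b], _ =>
      simp [PySem.List.enumerate_cons, PySem.List.enumerate_nil, pvF, pvGo,
        show ((s + 1) % 5 == 0) = false by simp; omega,
        show ((s + 1 + 1) % 5 == 0) = false by simp; omega]
    | [a, b, c], _ =>
      simp [PySem.List.enumerate_cons, PySem.List.enumerate_nil, pvF, pvGo,
        show ((s + 1) % 5 == 0) = false by simp; omega,
        show ((s + 1 + 1) % 5 == 0) = false by simp; omega,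
        show ((s + 1 + 1 + 1) % 5 == 0) = false by simp; omega]
    | [a, b, c, d], _ =>
      simp [PySem.List.enumerate_cons, PySem.List.enumerate_nil, pvF, pvGo,
        show ((s + 1) % 5 == 0) = false by simp; omega,
        show ((s + 1 + 1) % 5 == 0) = false by simp; omega,
        show ((s + 1 + 1 + 1) % 5 == 0) = false by simp; omega,
        show ((s + 1 + 1 + 1 + 1) % 5 == 0) = false by simp; omega]

theorem pvB_foldl (cs : List Char) (r : List Int) (acc : List (List Char)) :
    r.foldl
      (fun pieces start =>
        let chunk := PySem.List.slice cs (some start) (some (start + 5))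
        if chunk.length == 5 then
          pieces ++ [PySem.List.slice chunk none (some (4 : Int)) ++
                     [PySem.Chars.upperChar (PySem.List.pyGetD chunk 4 ' ')]]
        else pieces ++ [chunk]) acc
    = acc ++ r.map (pvH cs) := by
  induction r generalizing acc with
  | nil => simp
  | cons x xs ih =>
    simp only [List.foldl_cons, List.map_cons]
    rw [ih]
    by_cases h : (PySem.List.slice cs (some x) (some (x + 5))).length == 5 <;>
      simp [pvH, h]

theorem pvRange_five (n : Nat) (h : 5 ≤ n) :
    PySem.List.pyRange 0 (n : Int) 5
      = 0 :: (PySem.List.pyRange 0 ((n - 5 : Nat) : Int) 5).map (· + 5) := by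
  rw [PySem.List.pyRange_of_pos 0 (n : Int) (by norm_num),
      PySem.List.pyRange_of_pos 0 ((n - 5 : Nat) : Int) (by norm_num)]
  have hif : (if ((0 : Int) < ((n - 5 : Nat) : Int)) then
        ((((n - 5 : Nat) : Int) - 0 + 5 - 1) / 5).toNat else 0)
      = ((((n - 5 : Nat) : Int) + 4) / 5).toNat := by
    split <;> omega
  have heq : (((n : Int) - 0 + 5 - 1) / 5).toNat
      = ((((n - 5 : Nat) : Int) + 4) / 5).toNat + 1 := by omega
  rw [if_pos (by omega : (0 : Int) < (n : Int)), hif, heq, List.range_succ_eq_map]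
  simp only [List.map_cons, List.map_map]
  refine List.cons_eq_cons.mpr ⟨by norm_num, ?_⟩
  apply List.map_congr_left
  intro k _
  simp only [Function.comp_apply]
  push_cast
  ring

theorem pvH_shift (a b c d e : Char) (rest : List Char) (k : Int) (hk : 0 ≤ k) :
    pvH (a :: b :: c :: d :: e :: rest) (k + 5) = pvH rest k := by
  have h1 : PySem.List.slice (a :: b :: c :: d :: e :: rest) (some (k + 5)) (some (k + 5 + 5))
      = PySem.List.slice rest (some k) (some (k + 5)) := by
    rw [PySem.List.slice_toNat _ (by omega) (by omega),
        PySem.List.slice_toNat _ (by omega) (by omega)]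
    have : (k + 5).toNat = k.toNat + 5 := by omega
    rw [this]
    have h4 : (k + 5 + 5).toNat - (k.toNat + 5) = k.toNat + 5 - k.toNat := by omega
    rw [h4, show k.toNat + 5 = k.toNat + 1 + 1 + 1 + 1 + 1 from rfl]
    simp only [List.drop_succ_cons]
  simp only [pvH, h1]

theorem pvB_eq_go (cs : List Char) :
    ((PySem.List.pyRange 0 (cs.length : Int) 5).map (pvH cs)).flatten = pvGo cs := by
  induction cs using pvGo.induct with
  | case1 a b c d e rest ih =>
    have hlen : (a :: b :: c :: d :: e :: rest).length = rest.length + 5 := by simp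
    rw [hlen, pvRange_five (rest.length + 5) (by omega)]
    have hmin : rest.length + 5 - 5 = rest.length := by omega
    rw [hmin, List.map_cons, List.map_map]
    have hhead : pvH (a :: b :: c :: d :: e :: rest) 0 =
        a :: b :: c :: d :: [PySem.Chars.upperChar e] := by
      simp only [pvH]
      rw [PySem.List.slice_toNat _ (by norm_num) (by norm_num)]
      norm_num
      simp [PySem.List.slice, PySem.List.pyGetD, PySem.List.pyIdx?, PySem.List.pyGet?,
        PySem.List.clampIdx, List.take]
    have htail : ((PySem.List.pyRange 0 (rest.length : Int) 5).map
        ((pvH (a :: b :: c :: d :: e :: rest)) ∘ (· + 5)))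
        = (PySem.List.pyRange 0 (rest.length : Int) 5).map (pvH rest) := by
      apply List.map_congr_left
      intro k hk
      have hk0 : 0 ≤ k := by
        rw [PySem.List.pyRange_of_pos 0 (rest.length : Int) (by norm_num)] at hk
        simp at hk
        rcases hk with ⟨j, _, hj⟩
        omega
      exact pvH_shift a b c d e rest k hk0
    rw [List.flatten_cons, hhead, htail, ih]
    simp [pvGo]
  | case2 l hl =>
    -- fewer than 5 characters: at most one (partial) chunk, kept unchanged
    have hlen : l.length < 5 := by
      match l, hl with
      | a :: b :: c :: d :: e :: rest, hl => exact absurd rfl (hl a b c d e rest)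
      | [], _ => simp
      | [a], _ => simp
      | [a, b], _ => simp
      | [a, b, c], _ => simp
      | [a, b, c, d], _ => simp
    have hgo : pvGo l = l := by
      match l, hl with
      | a :: b :: c :: d :: e :: rest, hl => exact absurd rfl (hl a b c d e rest)
      | [], _ => rfl
      | [a], _ => rfl
      | [a, b], _ => rfl
      | [a, b, c], _ => rfl
      | [a, b, c, d], _ => rfl
    rw [hgo]
    by_cases h0 : l = []
    · subst h0
      rw [PySem.List.pyRange_of_pos 0 ((List.length ([] : List Char) : Nat) : Int) (by norm_num)]
      simp
    · have hpos : (0 : Int) < (l.length : Int) := by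
        cases l with
        | nil => exact absurd rfl h0
        | cons x xs => simp
      rw [PySem.List.pyRange_of_pos 0 (l.length : Int) (by norm_num), if_pos hpos]
      have hone : (((l.length : Int) - 0 + 5 - 1) / 5).toNat = 1 := by omega
      rw [hone]
      simp only [List.range_one, List.map_cons, List.map_nil, List.flatten_cons,
        List.flatten_nil, List.append_nil]
      have hchunk : pvH l (0 + 5 * ((0 : Nat) : Int)) = l := by
        simp only [pvH]
        rw [PySem.List.slice_toNat _ (by norm_num) (by norm_num)]
        norm_num
        rw [List.take_of_length_le (by omega)]
        rw [if_neg (by simp; omega)]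
      exact hchunk

-- ===== VERDICT (by name: the statement is the Claim_ definition above) =====
theorem capitalize_every_fifth_spec : Claim_equal_capitalize_every_fifth := by
  intro s _
  unfold Spec_capitalize_every_fifth capitalize_every_fifth capitalize_every_fifth_alt
  simp only [pvA_foldl, pvB_foldl, List.nil_append]
  rw [pvA_eq_go s.toList 0 (by norm_num), pvB_eq_go]
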